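-- pv_equiv track=rewrite | github.com/mxs170018/DatabaseProject | finalv1.py | stringMHelper
-- ===== SOURCE A (Python) =====
-- def stringMHelper(parE,ChildE,total, rangee):
--     occ = []
--     if parE == '-':
--         for line in total:
--             if line[1] == ChildE:
--                 occ.append(line[0])
--     else:
--         parOcc = []
--         for line in total:
--             if line[1] == parE:
--                 if line[0] >= rangee[0] and line[0] <= rangee[1]:
--                     if line[2] == ChildE:
--                         occ.append(line[3])
--
--     if(len(occ) >= 1):
--         return [occ[0],occ[-1]]
--     else:
--         return []
-- ===== SOURCE B (Python) =====
-- def stringMHelper(parE, ChildE, total, rangee):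
--     if parE == '-':
--         pred = lambda line: line[1] == ChildE
--         extract = lambda line: line[0]
--     else:
--         pred = lambda line: (line[1] == parE
--                              and rangee[0] <= line[0] <= rangee[1]
--                              and line[2] == ChildE)
--         extract = lambda line: line[3]
--     first = None
--     for line in total:
--         if pred(line):
--             first = extract(line)
--             break
--     if first is None:
--         return []
--     for line in reversed(total):
--         if pred(line):
--             return [first, extract(line)]
-- ===== Notes on version B (the rewrite author's own statement) =====
-- stated objective: alternative
-- what changed: Drops the occ accumulator list entirely: B does one forward early-exit scan for the first match and one backward early-exit scan for the last match, with the branch predicate/extraction factored into a single shared predicate instead of A's nested-if append loop.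
import Mathlib
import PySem

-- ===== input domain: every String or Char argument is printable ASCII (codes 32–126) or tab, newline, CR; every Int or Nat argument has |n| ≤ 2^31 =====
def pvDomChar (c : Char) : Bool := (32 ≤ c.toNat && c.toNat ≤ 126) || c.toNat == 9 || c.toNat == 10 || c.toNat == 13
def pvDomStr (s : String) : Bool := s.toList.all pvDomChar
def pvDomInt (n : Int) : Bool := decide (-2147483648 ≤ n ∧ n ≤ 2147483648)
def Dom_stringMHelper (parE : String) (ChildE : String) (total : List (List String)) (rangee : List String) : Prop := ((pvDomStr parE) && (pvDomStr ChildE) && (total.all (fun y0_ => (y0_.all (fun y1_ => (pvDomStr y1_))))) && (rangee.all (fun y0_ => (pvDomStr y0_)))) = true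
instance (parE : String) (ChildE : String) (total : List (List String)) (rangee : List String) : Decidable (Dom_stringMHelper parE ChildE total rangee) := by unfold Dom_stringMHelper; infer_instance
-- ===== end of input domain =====

-- B replaces A's accumulate-all occ list by two early-exit scans (forward for the first match,
-- backward over the reversed list for the last) with the branch predicate factored out; alternative
-- decomposition, same asymptotic cost. Pre_ excludes inputs where Python A raises IndexError.


-- ===== PORT A =====
-- List indices line[i] / rangee[i] are ported as getD with default ""; Pre_ guarantees every index
-- A actually evaluates is in range, so the default is never the value of any admitted run.
def stringMHelper (parE : String) (ChildE : String) (total : List (List String)) (rangee : List String) : List String :=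
  let occ : List String :=
    if parE = "-" then
      total.foldl (fun occ line =>
        if line.getD 1 "" = ChildE then occ ++ [line.getD 0 ""] else occ) []
    else
      total.foldl (fun occ line =>
        if line.getD 1 "" = parE then
          if (line.getD 0 "").toList ≥ (rangee.getD 0 "").toList ∧ (line.getD 0 "").toList ≤ (rangee.getD 1 "").toList then
            if line.getD 2 "" = ChildE then occ ++ [line.getD 3 ""] else occ
          else occ
        else occ) []
  if 1 ≤ occ.length then [occ.getD 0 "", occ.getLast?.getD ""] else []

-- ===== PORT B =====
-- the shared branch predicate (B's `pred` lambda)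
def bPred (parE : String) (ChildE : String) (rangee : List String) (line : List String) : Bool :=
  if parE = "-" then line.getD 1 "" == ChildE
  else line.getD 1 "" == parE
       && decide ((rangee.getD 0 "").toList ≤ (line.getD 0 "").toList) && decide ((line.getD 0 "").toList ≤ (rangee.getD 1 "").toList)
       && line.getD 2 "" == ChildE

-- B's `extract` lambda
def bExtract (parE : String) (line : List String) : String :=
  if parE = "-" then line.getD 0 "" else line.getD 3 ""

def stringMHelper_alt (parE : String) (ChildE : String) (total : List (List String)) (rangee : List String) : List String :=
  match total.find? (bPred parE ChildE rangee) with      -- forward scan, break at first match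
  | none => []
  | some l =>
    match total.reverse.find? (bPred parE ChildE rangee) with  -- backward scan (reversed(total))
    | none => []
    | some l' => [bExtract parE l, bExtract parE l']

-- ===== PRECONDITION & SPEC =====
-- Pre_ excludes exactly the inputs on which Python A raises IndexError (a list index line[i] or
-- rangee[i] evaluated out of range, following A's short-circuit order); A returns on all others.
def Pre_stringMHelper (parE : String) (ChildE : String) (total : List (List String)) (rangee : List String) : Prop :=
  if parE = "-" then ∀ l ∈ total, 2 ≤ l.length
  else ∀ l ∈ total, 2 ≤ l.length ∧
    (l.getD 1 "" = parE → 1 ≤ rangee.length ∧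
      ((rangee.getD 0 "").toList ≤ (l.getD 0 "").toList → 2 ≤ rangee.length ∧
        ((l.getD 0 "").toList ≤ (rangee.getD 1 "").toList → 3 ≤ l.length ∧
          (l.getD 2 "" = ChildE → 4 ≤ l.length))))
instance (parE : String) (ChildE : String) (total : List (List String)) (rangee : List String) : Decidable (Pre_stringMHelper parE ChildE total rangee) := by unfold Pre_stringMHelper; infer_instance

def pvWitness_stringMHelper : String × String × List (List String) × List String :=
  ("a", "x", [["p", "a", "x", "v"], ["q", "b"]], ["a", "z"])

def Spec_stringMHelper (parE : String) (ChildE : String) (total : List (List String)) (rangee : List String) (out : List String) : Prop := out = stringMHelper_alt parE ChildE total rangee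
instance (parE : String) (ChildE : String) (total : List (List String)) (rangee : List String) (out : List String) : Decidable (Spec_stringMHelper parE ChildE total rangee out) := by unfold Spec_stringMHelper; infer_instance

-- ===== CLAIM (what is proved, stated in full; the proofs are below) =====
def Claim_equal_stringMHelper : Prop := ∀ (parE : String) (ChildE : String) (total : List (List String)) (rangee : List String), Dom_stringMHelper parE ChildE total rangee → Pre_stringMHelper parE ChildE total rangee → Spec_stringMHelper parE ChildE total rangee (stringMHelper parE ChildE total rangee)

-- ===== LEMMAS AND PROOFS =====

-- A's append-loop computes the filter-map of the predicate.
theorem foldl_if_eq_filter_map {α β : Type} (p : α → Bool) (v : α → β) :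
    ∀ (l : List α) (acc : List β),
      l.foldl (fun occ x => if p x then occ ++ [v x] else occ) acc
        = acc ++ (l.filter p).map v := by
  intro l
  induction l with
  | nil => intro acc; simp
  | cons x xs ih =>
    intro acc
    by_cases h : p x = true <;> simp [h, ih]

theorem find?_eq_head?_filter {α : Type} (p : α → Bool) (l : List α) :
    l.find? p = (l.filter p).head? := by
  induction l with
  | nil => rfl
  | cons x xs ih =>
    cases h : p x
    · rw [List.find?_cons_of_neg (by simp [h]), List.filter_cons_of_neg (by simp [h]), ih]
    · rw [List.find?_cons_of_pos h, List.filter_cons_of_pos h, List.head?_cons]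

-- the two branch loop bodies are the generic append-step for bPred/bExtract
theorem stepDash (ChildE : String) (rangee : List String) :
    (fun (occ : List String) (line : List String) =>
        if line.getD 1 "" = ChildE then occ ++ [line.getD 0 ""] else occ)
      = fun occ line =>
        if bPred "-" ChildE rangee line then occ ++ [bExtract "-" line] else occ := by
  funext occ line
  simp [bPred, bExtract]

theorem stepElse (parE ChildE : String) (rangee : List String) (h : ¬ parE = "-") :
    (fun (occ : List String) (line : List String) =>
        if line.getD 1 "" = parE then
          if (line.getD 0 "").toList ≥ (rangee.getD 0 "").toList ∧ (line.getD 0 "").toList ≤ (rangee.getD 1 "").toList then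
            if line.getD 2 "" = ChildE then occ ++ [line.getD 3 ""] else occ
          else occ
        else occ)
      = fun occ line =>
        if bPred parE ChildE rangee line then occ ++ [bExtract parE line] else occ := by
  funext occ line
  simp only [bPred, bExtract, if_neg h]
  by_cases h1 : line.getD 1 "" = parE
  · by_cases h2 : (line.getD 0 "").toList ≥ (rangee.getD 0 "").toList ∧ (line.getD 0 "").toList ≤ (rangee.getD 1 "").toList
    · by_cases h4 : line.getD 2 "" = ChildE
      · rw [if_pos h1, if_pos h2, if_pos h4, if_pos (by
              simp only [Bool.and_eq_true, beq_iff_eq, decide_eq_true_eq]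
              exact ⟨⟨⟨h1, h2.1⟩, h2.2⟩, h4⟩)]
      · rw [if_pos h1, if_pos h2, if_neg h4,
            if_neg (by simp only [Bool.and_eq_true, beq_iff_eq, decide_eq_true_eq]
                       exact fun hh => h4 hh.2)]
    · rw [if_pos h1, if_neg h2,
          if_neg (by simp only [Bool.and_eq_true, beq_iff_eq, decide_eq_true_eq]
                     exact fun hh => h2 ⟨hh.1.1.2, hh.1.2⟩)]
  · rw [if_neg h1,
        if_neg (by simp only [Bool.and_eq_true, beq_iff_eq, decide_eq_true_eq]
                   exact fun hh => h1 hh.1.1.1)]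

theorem occ_dash (ChildE : String) (total : List (List String)) (rangee : List String) :
    total.foldl (fun occ line =>
        if line.getD 1 "" = ChildE then occ ++ [line.getD 0 ""] else occ) []
      = (total.filter (bPred "-" ChildE rangee)).map (bExtract "-") := by
  rw [stepDash ChildE rangee, foldl_if_eq_filter_map]; simp

theorem occ_else (parE ChildE : String) (total : List (List String)) (rangee : List String)
    (h : ¬ parE = "-") :
    total.foldl (fun occ line =>
        if line.getD 1 "" = parE then
          if (line.getD 0 "").toList ≥ (rangee.getD 0 "").toList ∧ (line.getD 0 "").toList ≤ (rangee.getD 1 "").toList then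
            if line.getD 2 "" = ChildE then occ ++ [line.getD 3 ""] else occ
          else occ
        else occ) []
      = (total.filter (bPred parE ChildE rangee)).map (bExtract parE) := by
  rw [stepElse parE ChildE rangee h, foldl_if_eq_filter_map]; simp

-- A's occ list, in either branch, is the filter-map of B's predicate/extractor.
theorem occ_spec (parE ChildE : String) (total : List (List String)) (rangee : List String) :
    (if parE = "-" then
      total.foldl (fun occ line =>
        if line.getD 1 "" = ChildE then occ ++ [line.getD 0 ""] else occ) []
    else
      total.foldl (fun occ line =>
        if line.getD 1 "" = parE then
          if (line.getD 0 "").toList ≥ (rangee.getD 0 "").toList ∧ (line.getD 0 "").toList ≤ (rangee.getD 1 "").toList then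
            if line.getD 2 "" = ChildE then occ ++ [line.getD 3 ""] else occ
          else occ
        else occ) [])
      = (total.filter (bPred parE ChildE rangee)).map (bExtract parE) := by
  by_cases h : parE = "-"
  · subst h; rw [if_pos rfl]; exact occ_dash ChildE total rangee
  · rw [if_neg h]; exact occ_else parE ChildE total rangee h

-- first/last of the filter-map agree with the forward and backward early-exit scans
theorem equiv_core (parE ChildE : String) (total : List (List String)) (rangee : List String) :
    (if 1 ≤ ((total.filter (bPred parE ChildE rangee)).map (bExtract parE)).length then
      [((total.filter (bPred parE ChildE rangee)).map (bExtract parE)).getD 0 "",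
       ((total.filter (bPred parE ChildE rangee)).map (bExtract parE)).getLast?.getD ""]
     else [])
      = stringMHelper_alt parE ChildE total rangee := by
  unfold stringMHelper_alt
  rw [find?_eq_head?_filter, find?_eq_head?_filter, List.filter_reverse, List.head?_reverse]
  cases hF : total.filter (bPred parE ChildE rangee) with
  | nil => simp
  | cons a rest =>
    obtain ⟨x, hx⟩ : ∃ x, (a :: rest).getLast? = some x :=
      Option.isSome_iff_exists.mp (by simp)
    simp only [List.map_cons, List.length_cons, le_add_iff_nonneg_left, Nat.zero_le, if_pos,
      List.head?_cons, hx, List.getD]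
    rw [← List.map_cons, List.getLast?_map, hx]
    simp

-- ===== VERDICT (by name: the statement is the Claim_ definition above) =====
theorem stringMHelper_spec : Claim_equal_stringMHelper := by
  intro parE ChildE total rangee _hDom _hPre
  unfold Spec_stringMHelper stringMHelper
  simp only [occ_spec parE ChildE total rangee]
  exact equiv_core parE ChildE total rangee
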